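-- pv_equiv track=rewrite | github.com/nbirillo/hyperstyle-analyze | analysis/src/python/data_analysis/templates/filter_by_diff.py | issues_offsets_to_positions
-- ===== SOURCE A (Python) =====
-- import bisect
-- from typing import List, Tuple
--
-- def get_code_prefix_lengths(code_lines: List[str]) -> List[int]:
--     code_prefix_length = [0]
--     for code_line in code_lines:
--         code_prefix_length.append(code_prefix_length[-1] + len(code_line))
--
--     return code_prefix_length
--
-- def issues_offsets_to_positions(offsets: List[int], code_lines: List[str]) -> List[Tuple[int, int]]:
--     code_prefix_lengths = get_code_prefix_lengths(code_lines)
--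
--     issues_positions = []
--     for offset in offsets:
--         line_number = bisect.bisect_right(code_prefix_lengths, offset)
--         if line_number == 0:
--             column_number = offset
--         else:
--             column_number = offset - code_prefix_lengths[line_number - 1]
--         issues_positions.append((line_number, column_number))
--
--     return issues_positions
-- ===== SOURCE B (Python) =====
-- from typing import List, Tuple
--
-- def _line_starts(code_lines: List[str]) -> List[int]:
--     total = 0
--     starts = [0]
--     for code_line in code_lines:
--         total += len(code_line)
--         starts.append(total)
--     return starts
--
-- def _position(offset: int, starts: List[int]) -> Tuple[int, int]:
--     line, last = 0, 0
--     for start in starts: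
--         if start > offset:
--             break
--         line, last = line + 1, start
--     return line, offset - last
--
-- def issues_offsets_to_positions(offsets: List[int], code_lines: List[str]) -> List[Tuple[int, int]]:
--     starts = _line_starts(code_lines)
--     return [_position(offset, starts) for offset in offsets]
-- ===== Notes on version B (the rewrite author's own statement) =====
-- stated objective: simpler
-- what changed: Replaced the per-offset bisect_right binary search over the prefix table by a plain linear scan over the line-start boundaries with an early break: the line number is the count of boundaries at or before the offset and the column is the distance from the last such boundary (0 when none has been passed).
import Mathlib
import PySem

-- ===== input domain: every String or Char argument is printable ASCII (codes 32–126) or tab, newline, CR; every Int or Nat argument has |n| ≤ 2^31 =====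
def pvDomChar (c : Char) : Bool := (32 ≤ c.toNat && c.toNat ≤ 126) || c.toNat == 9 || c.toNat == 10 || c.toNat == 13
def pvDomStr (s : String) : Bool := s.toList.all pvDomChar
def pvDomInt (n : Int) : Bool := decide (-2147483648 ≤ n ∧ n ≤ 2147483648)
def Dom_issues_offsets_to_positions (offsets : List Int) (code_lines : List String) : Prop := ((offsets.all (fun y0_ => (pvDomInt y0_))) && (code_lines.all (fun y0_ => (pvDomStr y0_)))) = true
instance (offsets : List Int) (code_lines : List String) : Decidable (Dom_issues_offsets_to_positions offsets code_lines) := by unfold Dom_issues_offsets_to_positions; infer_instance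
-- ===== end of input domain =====

-- B replaces the per-offset bisect_right binary search on the prefix table by a linear
-- scan over the line-start boundaries with an early break (simpler); return values equal.

-- ===== PORT A =====
def get_code_prefix_lengths (code_lines : List String) : List Int :=
  code_lines.foldl
    (fun acc line => acc ++ [PySem.List.pyGetD acc (-1) 0 + PySem.Str.len line]) [0]

def issues_offsets_to_positions (offsets : List Int) (code_lines : List String) : List (Int × Int) :=
  let code_prefix_lengths := get_code_prefix_lengths code_lines
  offsets.foldl
    (fun acc offset =>
      let line_number : Int := (PySem.List.bisectRight code_prefix_lengths offset : Nat)
      let column_number : Int :=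
        if line_number = 0 then offset
        else offset - PySem.List.pyGetD code_prefix_lengths (line_number - 1) 0
      acc ++ [(line_number, column_number)]) []

-- ===== PORT B =====
-- _line_starts: running total, starts = [0] then append each cumulative length
def pvLineStarts (code_lines : List String) : List Int :=
  (code_lines.foldl
    (fun st line => (st.1 + PySem.Str.len line, st.2 ++ [st.1 + PySem.Str.len line]))
    (0, [0])).2

-- _position: the for-loop with break, state (line, last)
def pvPosScan (offset : Int) : List Int → Int → Int → Int × Int
  | [], line, last => (line, last)
  | start :: rest, line, last =>
    if start > offset then (line, last)
    else pvPosScan offset rest (line + 1) start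

def pvPosition (offset : Int) (starts : List Int) : Int × Int :=
  let r := pvPosScan offset starts 0 0
  (r.1, offset - r.2)

def issues_offsets_to_positions_alt (offsets : List Int) (code_lines : List String) : List (Int × Int) :=
  let starts := pvLineStarts code_lines
  offsets.map (fun offset => pvPosition offset starts)

-- ===== PRECONDITION & SPEC =====
def Spec_issues_offsets_to_positions (offsets : List Int) (code_lines : List String) (out : List (Int × Int)) : Prop := out = issues_offsets_to_positions_alt offsets code_lines
instance (offsets : List Int) (code_lines : List String) (out : List (Int × Int)) : Decidable (Spec_issues_offsets_to_positions offsets code_lines out) := by unfold Spec_issues_offsets_to_positions; infer_instance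

-- ===== CLAIM (what is proved, stated in full; the proofs are below) =====
def Claim_equal_issues_offsets_to_positions : Prop := ∀ (offsets : List Int) (code_lines : List String), Dom_issues_offsets_to_positions offsets code_lines → Spec_issues_offsets_to_positions offsets code_lines (issues_offsets_to_positions offsets code_lines)

-- ===== LEMMAS AND PROOFS =====

-- the tail of the boundary list, starting from a running total
def prefFrom (cum : Int) : List String → List Int
  | [] => []
  | l :: ls => (cum + PySem.Str.len l) :: prefFrom (cum + PySem.Str.len l) ls

theorem gcpl_fold (cl : List String) : ∀ (acc : List Int) (x : Int),
    cl.foldl (fun acc line => acc ++ [PySem.List.pyGetD acc (-1) 0 + PySem.Str.len line]) (acc ++ [x])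
      = acc ++ x :: prefFrom x cl := by
  induction cl with
  | nil => intro acc x; simp [prefFrom]
  | cons l ls ih =>
    intro acc x
    simp only [List.foldl_cons, PySem.List.pyGetD_neg_one_append_singleton, prefFrom]
    have := ih (acc ++ [x]) (x + PySem.Str.len l)
    simpa using this

theorem gcpl_eq (cl : List String) : get_code_prefix_lengths cl = 0 :: prefFrom 0 cl := by
  have := gcpl_fold cl [] 0
  simpa [get_code_prefix_lengths] using this

theorem starts_fold (cl : List String) : ∀ (acc : List Int) (x : Int),
    cl.foldl (fun st line => (st.1 + PySem.Str.len line, st.2 ++ [st.1 + PySem.Str.len line]))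
      (x, acc)
      = (x + (cl.map PySem.Str.len).sum, acc ++ prefFrom x cl) := by
  induction cl with
  | nil => intro acc x; simp [prefFrom]
  | cons l ls ih =>
    intro acc x
    simp only [List.foldl_cons, prefFrom]
    rw [ih]
    simp only [List.map_cons, List.sum_cons, Prod.mk.injEq, List.append_assoc]
    constructor
    · ring
    · simp

theorem starts_eq (cl : List String) : pvLineStarts cl = 0 :: prefFrom 0 cl := by
  unfold pvLineStarts
  rw [show ((0 : Int), ([0] : List Int)) = ((0 : Int), ([] : List Int) ++ [0]) by simp]
  rw [show (([] : List Int) ++ [(0:Int)]) = [(0:Int)] by simp]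
  have := starts_fold cl [0] 0
  rw [this]
  simp

theorem len_nonneg (s : String) : 0 ≤ PySem.Str.len s := by
  simp [PySem.Str.len_eq]

theorem sorted_cons_prefFrom (cl : List String) : ∀ cum : Int,
    List.Pairwise (fun a b : Int => a ≤ b) (cum :: prefFrom cum cl) := by
  induction cl with
  | nil => intro cum; simp [prefFrom]
  | cons l ls ih =>
    intro cum
    have h := ih (cum + PySem.Str.len l)
    have hle : cum ≤ cum + PySem.Str.len l := by
      have := len_nonneg l; omega
    simp only [prefFrom]
    refine List.pairwise_cons.mpr ⟨?_, h⟩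
    intro b hb
    rcases List.mem_cons.mp hb with rfl | hb
    · exact hle
    · have := (List.pairwise_cons.mp h).1 b hb
      omega

theorem scan_eq (offset : Int) : ∀ (l : List Int) (line last : Int),
    pvPosScan offset l line last
      = (line + ((l.takeWhile (fun p => decide (p ≤ offset))).length : Int),
         (l.takeWhile (fun p => decide (p ≤ offset))).getLastD last) := by
  intro l
  induction l with
  | nil => intro line last; simp [pvPosScan]
  | cons b bs ih =>
    intro line last
    simp only [pvPosScan]
    by_cases h : b > offset
    · rw [if_pos h, List.takeWhile_cons_of_neg (by simp; omega)]
      simp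
    · rw [if_neg h, ih, List.takeWhile_cons_of_pos (by simp; omega)]
      simp only [List.length_cons, List.getLastD_cons, Prod.mk.injEq]
      exact ⟨by push_cast; ring, trivial⟩

theorem takeWhile_getElem_sat {α : Type} (p : α → Bool) :
    ∀ (l : List α) (j : Nat) (hj : j < l.length),
      j < (l.takeWhile p).length → p l[j] = true := by
  intro l j hj hlt
  have hpref : l.takeWhile p <+: l := List.takeWhile_prefix p
  have hg := List.IsPrefix.getElem hpref hlt
  have hm := List.mem_takeWhile_imp (List.getElem_mem hlt)
  rw [hg] at hm
  exact hm

theorem takeWhile_stop {α : Type} (p : α → Bool) :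
    ∀ (l : List α) (h : (l.takeWhile p).length < l.length),
      p l[(l.takeWhile p).length] = false := by
  intro l
  induction l with
  | nil => intro h; simp at h
  | cons a l' ih =>
    intro h
    by_cases ha : p a
    · simp only [List.takeWhile_cons, ha, if_pos] at h ⊢
      simp only [List.length_cons] at h ⊢
      simpa using ih (by omega)
    · simp [ha]

theorem bisect_eq_takeWhile (l : List Int) (x : Int)
    (hs : List.Pairwise (fun a b : Int => a ≤ b) l) :
    PySem.List.bisectRight l x = (l.takeWhile (fun p => decide (p ≤ x))).length := by
  obtain ⟨hk, hlo, hhi⟩ := PySem.List.bisectRight_spec l x hs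
  set k := PySem.List.bisectRight l x with hkdef
  set t := (l.takeWhile (fun p => decide (p ≤ x))).length with htdef
  have ht_le : t ≤ l.length := by
    have := (List.takeWhile_prefix (l := l) (fun p => decide (p ≤ x))).length_le
    simpa [htdef] using this
  by_contra hne
  rcases Nat.lt_or_ge k t with hlt | hge
  · have hkl : k < l.length := lt_of_lt_of_le hlt ht_le
    have h1 := takeWhile_getElem_sat (fun p => decide (p ≤ x)) l k hkl hlt
    have h2 := hhi k hkl (le_refl k)
    simp at h1
    omega
  · have hlt : t < k := lt_of_le_of_ne hge (fun h => hne h.symm)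
    have htl : t < l.length := lt_of_lt_of_le hlt hk
    have h1 := takeWhile_stop (fun p => decide (p ≤ x)) l (by simpa [htdef] using htl)
    have h2 := hlo t htl hlt
    simp at h1
    exact absurd h2 (not_le.mpr h1)

theorem prefix_getD_last (tw l : List Int) (h : tw <+: l) (hne : tw ≠ []) :
    PySem.List.pyGetD l ((tw.length : Int) - 1) 0 = tw.getLastD 0 := by
  have hpos : 0 < tw.length := List.length_pos_iff.mpr hne
  have hcast : ((tw.length : Int) - 1) = ((tw.length - 1 : Nat) : Int) := by omega
  rw [hcast, PySem.List.pyGetD_natCast]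
  have hlt : tw.length - 1 < l.length := by
    have := h.length_le; omega
  have hlt' : tw.length - 1 < tw.length := by omega
  rw [List.getD_eq_getElem _ _ hlt]
  have hg := List.IsPrefix.getElem h (i := tw.length - 1) hlt'
  have h2 : tw[tw.length - 1]'hlt' = tw.getLastD 0 := by
    rw [List.getLastD_eq_getLast?, List.getLast?_eq_some_getLast hne,
      List.getLast_eq_getElem]
    simp
  exact hg.symm.trans h2

theorem per_offset (offset : Int) (cl : List String) :
    (let P := get_code_prefix_lengths cl
     let line_number : Int := (PySem.List.bisectRight P offset : Nat)
     let column_number : Int :=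
       if line_number = 0 then offset
       else offset - PySem.List.pyGetD P (line_number - 1) 0
     ((line_number, column_number) : Int × Int)) = pvPosition offset (pvLineStarts cl) := by
  have hP := gcpl_eq cl
  have hS := starts_eq cl
  set bounds := (0 : Int) :: prefFrom 0 cl with hbounds
  set tw := bounds.takeWhile (fun p => decide (p ≤ offset)) with htw
  have hsorted : List.Pairwise (fun a b : Int => a ≤ b) bounds := sorted_cons_prefFrom cl 0
  have hbis : PySem.List.bisectRight bounds offset = tw.length :=
    bisect_eq_takeWhile bounds offset hsorted
  have hB : pvPosition offset (pvLineStarts cl) = ((tw.length : Int), offset - tw.getLastD 0) := by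
    unfold pvPosition
    rw [hS, scan_eq offset bounds 0 0, ← htw]
    simp
  rw [hB]
  simp only [hP, hbis]
  by_cases h0 : tw.length = 0
  · have htwnil : tw = [] := List.length_eq_zero_iff.mp h0
    simp [htwnil]
  · have hne : tw ≠ [] := by
      intro hc; rw [hc] at h0; simp at h0
    have hcol := prefix_getD_last tw bounds (List.takeWhile_prefix _) hne
    rw [if_neg (by exact_mod_cast h0)]
    rw [hcol]

theorem A_foldl_eq_map (offsets : List Int) (cl : List String) :
    issues_offsets_to_positions offsets cl
      = offsets.map (fun offset =>
          let P := get_code_prefix_lengths cl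
          let line_number : Int := (PySem.List.bisectRight P offset : Nat)
          let column_number : Int :=
            if line_number = 0 then offset
            else offset - PySem.List.pyGetD P (line_number - 1) 0
          ((line_number, column_number) : Int × Int)) := by
  unfold issues_offsets_to_positions
  rw [PySem.List.foldl_append_singleton_eq_map]
  simp only [List.nil_append]

-- ===== VERDICT (by name: the statement is the Claim_ definition above) =====
theorem issues_offsets_to_positions_spec : Claim_equal_issues_offsets_to_positions := by
  intro offsets code_lines _
  unfold Spec_issues_offsets_to_positions issues_offsets_to_positions_alt
  rw [A_foldl_eq_map]
  exact List.map_congr_left (fun offset _ => per_offset offset code_lines)
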